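-- pv_equiv track=rewrite | github.com/samtherussell/squeezebox-controller | squeezebox_controller/string_distance.py | enumerate_regex
-- ===== SOURCE A (Python) =====
-- from collections import deque
--
-- def enumerate_regex(regex):
--   done = []
--   doing = deque([('', regex)])
--   while len(doing) > 0:
--     x = doing.popleft()
--     s,r = x
--     start = r.find('(')
--     if start == -1:
--       done.append(s + r)
--       continue
--
--     end = r.find(')', start+1)
--     if end == -1:
--       raise Exception(f"bad regex: {r}")
--
--     options = r[start+1:end].split('|')
--     if end+1 < len(r) and r[end+1] == '?':
--       options.append('')
--       end += 1
--
--     before = r[:start]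
--     after = r[end+1:]
--     for option in options:
--       doing.append((s + before + option, after))
--
--   return done
-- ===== SOURCE B (Python) =====
-- import itertools
--
-- def enumerate_regex(regex):
--   # One pass: parse into parts (literal -> [literal], group -> option list),
--   # then combine with itertools.product (leftmost varies slowest = A's order).
--   parts = []
--   rest = regex
--   while True:
--     start = rest.find('(')
--     if start == -1:
--       parts.append([rest])
--       break
--     end = rest.find(')', start+1)
--     if end == -1:
--       raise Exception(f"bad regex: {rest}")
--     options = rest[start+1:end].split('|')
--     if end+1 < len(rest) and rest[end+1] == '?':
--       options.append('')
--       end += 1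
--     parts.append([rest[:start]])
--     parts.append(options)
--     rest = rest[end+1:]
--   return [''.join(p) for p in itertools.product(*parts)]
-- ===== Notes on version B (the rewrite author's own statement) =====
-- stated objective: simpler
-- what changed: A's BFS over a deque of (prefix, remaining-regex) pairs is replaced by a single left-to-right parse of the regex into parts (fixed literals and alternation option lists, '' appended for '?', same Exception on an unmatched '(') combined with itertools.product, whose leftmost-slowest order reproduces A's output order exactly.
import Mathlib
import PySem

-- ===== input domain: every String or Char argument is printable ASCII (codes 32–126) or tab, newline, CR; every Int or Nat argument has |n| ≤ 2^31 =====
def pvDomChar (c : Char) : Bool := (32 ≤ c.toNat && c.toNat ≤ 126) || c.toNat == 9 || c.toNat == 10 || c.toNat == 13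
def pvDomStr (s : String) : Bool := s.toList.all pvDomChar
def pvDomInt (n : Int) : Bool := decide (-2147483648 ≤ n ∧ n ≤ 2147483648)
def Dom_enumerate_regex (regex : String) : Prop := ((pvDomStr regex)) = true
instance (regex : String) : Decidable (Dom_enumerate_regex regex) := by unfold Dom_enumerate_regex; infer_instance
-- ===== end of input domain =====

-- B replaces A's BFS work queue of (prefix, remaining-regex) pairs by a single parsing
-- pass into parts (literals and option lists) combined with itertools.product; objective: simpler.


-- helper facts the ports cite for termination (kept above the ports for that reason)
theorem pvSplitOn_go_length (sep : List Char) (hsep : 0 < sep.length) :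
    ∀ (fuel : Nat) (l cur : List Char) (acc : List (List Char)),
    (PySem.Chars.splitOn.go sep fuel l cur acc).length ≤ acc.length + 1 + l.length := by
  intro fuel
  induction fuel with
  | zero => intro l cur acc; simp [PySem.Chars.splitOn.go]
  | succ fuel ih =>
    intro l cur acc
    match l with
    | [] => simp [PySem.Chars.splitOn.go]
    | c :: rest =>
      rw [PySem.Chars.splitOn.go]
      split
      · have := ih (List.drop sep.length (c :: rest)) [] (cur.reverse :: acc)
        simp at this ⊢
        omega
      · have := ih rest (c :: cur) acc
        simp at this ⊢
        omega

theorem pvSplitOn_length (l : List Char) :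
    (PySem.Chars.splitOn l ['|']).length ≤ l.length + 1 := by
  have := pvSplitOn_go_length ['|'] (by simp) (l.length + 1) l [] []
  simp only [List.length_nil] at this
  unfold PySem.Chars.splitOn
  omega

-- a successful r.find(c) names a position of c
theorem pvFind_single (r : List Char) (c : Char) (h : PySem.Chars.find r [c] ≠ -1) :
    ∃ i : Nat, PySem.Chars.find r [c] = (i : Int) ∧ r[i]? = some c ∧ i < r.length := by
  have h0 : 0 ≤ PySem.Chars.find r [c] := by
    rw [PySem.Chars.find_nonneg_iff]
    exact (PySem.Chars.find_ne_neg_one_iff r [c]).mp h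
  refine ⟨(PySem.Chars.find r [c]).toNat, by omega, ?_, ?_⟩
  · obtain ⟨u, hu⟩ := (PySem.Chars.find_spec h0).1
    rw [← List.head?_drop, ← hu]; rfl
  · obtain ⟨u, hu⟩ := (PySem.Chars.find_spec h0).1
    have : 0 < (List.drop (PySem.Chars.find r [c]).toNat r).length := by rw [← hu]; simp
    simp [List.length_drop] at this
    omega

-- a successful r.find(')', st+1) names a position past st
theorem pvFindFrom_single (r : List Char) (st : Nat) (hst : st < r.length)
    (h : PySem.Chars.findFrom r [')'] ((st : Int) + 1) ≠ -1) :
    ∃ e : Nat, PySem.Chars.findFrom r [')'] ((st : Int) + 1) = ((st + 1 + e : Nat) : Int) ∧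
      (r.drop (st + 1))[e]? = some ')' ∧ st + 1 + e < r.length := by
  have hk : st + 1 ≤ r.length := hst
  have hcast : ((st : Int) + 1) = ((st + 1 : Nat) : Int) := by push_cast; ring
  rw [hcast, PySem.Chars.findFrom_natCast r [')'] (st + 1) hk] at h ⊢
  split at h
  · omega
  · rename_i hfind
    obtain ⟨e, he, hget, hlt⟩ := pvFind_single (r.drop (st + 1)) ')' hfind
    simp [List.length_drop] at hlt
    refine ⟨e, ?_, hget, by omega⟩
    simp only [hfind, if_false]
    rw [he]; push_cast; ring

theorem pvFact_step (k m n : Nat) (hk : k ≤ n) (hm : m + 2 ≤ n) :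
    k * (m + 1).factorial < (n + 1).factorial := by
  have h1 : (m + 1).factorial ≤ (n - 1).factorial :=
    Nat.factorial_le (by omega)
  have h2 : k * (m + 1).factorial ≤ n * (n - 1).factorial :=
    Nat.mul_le_mul hk h1
  have h3 : n * (n - 1).factorial = n.factorial := Nat.mul_factorial_pred (by omega)
  have h4 : n.factorial < (n + 1).factorial := by
    rw [Nat.factorial_lt (by omega)]; omega
  omega

-- ===== PORT A =====
-- A's while-loop over the deque `doing`: `done` is the result accumulator, each queue
-- item is (s, r).  `find`, `findFrom`, `splitOn`, `slice`, `pyGet?` port r.find('('),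
-- r.find(')', start+1), .split('|'), r[a:b] and r[end+1].
def aLoop (done : List (List Char)) (q : List (List Char × List Char)) : List (List Char) :=
  match q with
  | [] => done
  | (s, r) :: rest =>
    let start := PySem.Chars.find r ['(']
    if _hs : start = -1 then
      aLoop (done ++ [s ++ r]) rest
    else
      let endI := PySem.Chars.findFrom r [')'] (start + 1)
      if _he : endI = -1 then
        -- Python: raise Exception(f"bad regex: {r}") — excluded by Pre_enumerate_regex
        done
      else
        let options := PySem.Chars.splitOn (PySem.List.slice r (some (start + 1)) (some endI)) ['|']
        if _hq : endI + 1 < (r.length : Int) ∧ PySem.List.pyGet? r (endI + 1) = some '?' then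
          aLoop done (rest ++ (options ++ [[]]).map (fun o =>
            (s ++ PySem.List.slice r none (some start) ++ o, PySem.List.slice r (some (endI + 2)) none)))
        else
          aLoop done (rest ++ options.map (fun o =>
            (s ++ PySem.List.slice r none (some start) ++ o, PySem.List.slice r (some (endI + 1)) none)))
  termination_by (q.map (fun p => (p.2.length + 1).factorial)).sum
  decreasing_by
  · simp only [List.map_cons, List.sum_cons]
    have := Nat.factorial_pos (r.length + 1)
    omega
  · replace hs : PySem.Chars.find r ['('] ≠ -1 := _hs
    replace he : PySem.Chars.findFrom r [')'] (PySem.Chars.find r ['('] + 1) ≠ -1 := _he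
    replace hq : PySem.Chars.findFrom r [')'] (PySem.Chars.find r ['('] + 1) + 1 < (r.length : Int) ∧
      PySem.List.pyGet? r (PySem.Chars.findFrom r [')'] (PySem.Chars.find r ['('] + 1) + 1) = some '?' := _hq
    obtain ⟨st, hstEq, hstGet, hstLt⟩ := pvFind_single r '(' hs
    rw [hstEq] at he hq ⊢
    obtain ⟨e, heEq, -, heLt⟩ := pvFindFrom_single r st hstLt he
    rw [heEq] at hq ⊢
    have _hq1 : (st + 1 + e : Nat) + 1 < r.length := by
      have := hq.1; push_cast at this; omega
    have hcast3 : (((st + 1 + e : Nat) : Int) + 2) = ((st + e + 3 : Nat) : Int) := by push_cast; ring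
    have hcast1 : ((st : Int) + 1) = ((st + 1 : Nat) : Int) := by push_cast; ring
    rw [hcast3, hcast1, PySem.List.slice_from r (by positivity), PySem.List.slice_natCast]
    simp only [List.map_append, List.sum_append, List.map_map, List.map_cons, List.sum_cons,
      List.map_nil, List.sum_nil, Int.toNat_natCast, Function.comp_def]
    rw [PySem.List.sum_map_const_nat]
    have h1 := pvSplitOn_length (List.take ((st + 1 + e) - (st + 1)) (List.drop (st + 1) r))
    have h2 : (List.take ((st + 1 + e) - (st + 1)) (List.drop (st + 1) r)).length ≤ e := by
      simp [List.length_take, List.length_drop]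
    have hk2 : (PySem.Chars.splitOn (List.take ((st + 1 + e) - (st + 1)) (List.drop (st + 1) r)) ['|']).length + 1 ≤ r.length := by omega
    have hfact := pvFact_step _ ((List.drop (st + e + 3) r).length) r.length hk2 (by simp only [List.length_drop]; omega)
    rw [add_mul, one_mul] at hfact
    omega
  · replace hs : PySem.Chars.find r ['('] ≠ -1 := _hs
    replace he : PySem.Chars.findFrom r [')'] (PySem.Chars.find r ['('] + 1) ≠ -1 := _he
    obtain ⟨st, hstEq, hstGet, hstLt⟩ := pvFind_single r '(' hs
    rw [hstEq] at he ⊢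
    obtain ⟨e, heEq, -, heLt⟩ := pvFindFrom_single r st hstLt he
    rw [heEq] at ⊢
    have hcast2 : (((st + 1 + e : Nat) : Int) + 1) = ((st + e + 2 : Nat) : Int) := by push_cast; ring
    have hcast1 : ((st : Int) + 1) = ((st + 1 : Nat) : Int) := by push_cast; ring
    rw [hcast2, hcast1, PySem.List.slice_from r (by positivity), PySem.List.slice_natCast]
    simp only [List.map_append, List.sum_append, List.map_map, List.map_cons, List.sum_cons,
      Int.toNat_natCast, Function.comp_def]
    rw [PySem.List.sum_map_const_nat]
    have hkbound : (PySem.Chars.splitOn (List.take ((st + 1 + e) - (st + 1)) (List.drop (st + 1) r)) ['|'] ++ [[]]).length ≤ e + 2 := by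
      have h1 := pvSplitOn_length (List.take ((st + 1 + e) - (st + 1)) (List.drop (st + 1) r))
      have h2 : (List.take ((st + 1 + e) - (st + 1)) (List.drop (st + 1) r)).length ≤ e := by
        simp [List.length_take, List.length_drop]
      simp only [List.length_append, List.length_cons, List.length_nil]
      omega
    have hk2 : (PySem.Chars.splitOn (List.take ((st + 1 + e) - (st + 1)) (List.drop (st + 1) r)) ['|']).length ≤ r.length := by
      simp only [List.length_append, List.length_cons, List.length_nil] at hkbound
      omega
    have hfact := pvFact_step _ ((List.drop (st + e + 2) r).length) r.length hk2 (by simp only [List.length_drop]; omega)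
    omega

def enumerate_regex (regex : String) : List String :=
  (aLoop [] [([], regex.toList)]).map (fun cs => String.ofList cs)

-- ===== PORT B =====
-- B's parsing loop, accumulating `parts`: each step emits the literal before the group
-- and the group's option list, then continues on the rest of the regex.
def parseParts (r : List Char) : List (List (List Char)) :=
  let start := PySem.Chars.find r ['(']
  if _hs : start = -1 then
    [[r]]
  else
    let endI := PySem.Chars.findFrom r [')'] (start + 1)
    if _he : endI = -1 then
      -- Python: raise Exception(f"bad regex: {rest}") — excluded by Pre_enumerate_regex
      []
    else
      let options := PySem.Chars.splitOn (PySem.List.slice r (some (start + 1)) (some endI)) ['|']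
      if endI + 1 < (r.length : Int) ∧ PySem.List.pyGet? r (endI + 1) = some '?' then
        [PySem.List.slice r none (some start)] :: (options ++ [[]]) ::
          parseParts (PySem.List.slice r (some (endI + 2)) none)
      else
        [PySem.List.slice r none (some start)] :: options ::
          parseParts (PySem.List.slice r (some (endI + 1)) none)
  termination_by r.length
  decreasing_by
  · replace hs : PySem.Chars.find r ['('] ≠ -1 := _hs
    replace he : PySem.Chars.findFrom r [')'] (PySem.Chars.find r ['('] + 1) ≠ -1 := _he
    obtain ⟨st, hstEq, hstGet, hstLt⟩ := pvFind_single r '(' hs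
    rw [hstEq] at he ⊢
    obtain ⟨e, heEq, -, heLt⟩ := pvFindFrom_single r st hstLt he
    rw [heEq]
    have hcast3 : (((st + 1 + e : Nat) : Int) + 2) = ((st + e + 3 : Nat) : Int) := by push_cast; ring
    rw [hcast3, PySem.List.slice_from r (by positivity)]
    simp only [Int.toNat_natCast, List.length_drop]
    omega
  · replace hs : PySem.Chars.find r ['('] ≠ -1 := _hs
    replace he : PySem.Chars.findFrom r [')'] (PySem.Chars.find r ['('] + 1) ≠ -1 := _he
    obtain ⟨st, hstEq, hstGet, hstLt⟩ := pvFind_single r '(' hs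
    rw [hstEq] at he ⊢
    obtain ⟨e, heEq, -, heLt⟩ := pvFindFrom_single r st hstLt he
    rw [heEq]
    have hcast2 : (((st + 1 + e : Nat) : Int) + 1) = ((st + e + 2 : Nat) : Int) := by push_cast; ring
    rw [hcast2, PySem.List.slice_from r (by positivity)]
    simp only [Int.toNat_natCast, List.length_drop]
    omega

-- itertools.product over the parts, each tuple joined: leftmost part varies slowest,
-- so the product and the join are fused into one pass producing the joined strings.
def prodParts : List (List (List Char)) → List (List Char)
  | [] => [[]]
  | p :: ps => p.flatMap (fun o => (prodParts ps).map (fun t => o ++ t))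

def enumerate_regex_alt (regex : String) : List String :=
  (prodParts (parseParts regex.toList)).map (fun cs => String.ofList cs)

-- ===== PRECONDITION & SPEC =====
-- every '(' must be followed by some later ')': on any other input A raises
-- Exception("bad regex: …") (and B raises the same exception).
def goodChars : List Char → Bool
  | [] => true
  | c :: cs => (!decide (c = '(') || decide (')' ∈ cs)) && goodChars cs

def Pre_enumerate_regex (regex : String) : Prop := goodChars regex.toList = true
instance (regex : String) : Decidable (Pre_enumerate_regex regex) := by unfold Pre_enumerate_regex; infer_instance

def pvWitness_enumerate_regex : String := "play (the|a|)(song|track)? please"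

def Spec_enumerate_regex (regex : String) (out : List String) : Prop := out = enumerate_regex_alt regex
instance (regex : String) (out : List String) : Decidable (Spec_enumerate_regex regex out) := by unfold Spec_enumerate_regex; infer_instance

-- ===== CLAIM (what is proved, stated in full; the proofs are below) =====
def Claim_equal_enumerate_regex : Prop := ∀ (regex : String), Dom_enumerate_regex regex → Pre_enumerate_regex regex → Spec_enumerate_regex regex (enumerate_regex regex)

-- ===== LEMMAS AND PROOFS =====

-- proof-side normal forms and bridge lemmas

def expandE (r : List Char) : List (List Char) := prodParts (parseParts r)

def qmarkAt (r : List Char) (en : Nat) : Bool := decide (r[en + 1]? = some '?')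

def optsOf (r : List Char) (st en : Nat) : List (List Char) :=
  PySem.Chars.splitOn ((r.drop (st + 1)).take (en - (st + 1))) ['|'] ++
    (if qmarkAt r en then [[]] else [])

def afterOf (r : List Char) (en : Nat) : List Char :=
  r.drop (if qmarkAt r en then en + 2 else en + 1)

theorem pvQmark_iff (r : List Char) (en : Nat) :
    ((en : Int) + 1 < (r.length : Int) ∧ PySem.List.pyGet? r ((en : Int) + 1) = some '?') ↔
      qmarkAt r en = true := by
  have hcast : ((en : Int) + 1) = ((en + 1 : Nat) : Int) := by push_cast; ring
  rw [hcast, PySem.List.pyGet?_natCast, qmarkAt]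
  constructor
  · intro h; simpa using h.2
  · intro h
    simp only [decide_eq_true_eq] at h
    refine ⟨?_, h⟩
    obtain ⟨hlt, -⟩ := List.getElem?_eq_some_iff.mp h
    omega

theorem aLoop_nil (done : List (List Char)) : aLoop done [] = done := by
  rw [aLoop]

theorem aLoop_cons_none (done : List (List Char)) (s r : List Char) (rest : List (List Char × List Char))
    (hs : PySem.Chars.find r ['('] = -1) :
    aLoop done ((s, r) :: rest) = aLoop (done ++ [s ++ r]) rest := by
  rw [aLoop]
  simp [hs]

theorem aLoop_cons_group (done : List (List Char)) (s r : List Char) (rest : List (List Char × List Char))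
    (st en : Nat)
    (hs : PySem.Chars.find r ['('] = (st : Int))
    (he : PySem.Chars.findFrom r [')'] ((st : Int) + 1) = (en : Int)) :
    aLoop done ((s, r) :: rest) =
      aLoop done (rest ++ (optsOf r st en).map (fun o => (s ++ r.take st ++ o, afterOf r en))) := by
  rw [aLoop]
  have hne : ¬ PySem.Chars.find r ['('] = -1 := by rw [hs]; omega
  have hne2 : ¬ PySem.Chars.findFrom r [')'] ((st : Int) + 1) = -1 := by rw [he]; omega
  simp only [hs, he]
  have hslice1 : PySem.List.slice r none (some (st : Int)) = r.take st := by
    rw [PySem.List.slice_to r (by positivity)]; simp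
  have hslice2 : PySem.List.slice r (some ((st : Int) + 1)) (some (en : Int)) =
      (r.drop (st + 1)).take (en - (st + 1)) := by
    have : ((st : Int) + 1) = ((st + 1 : Nat) : Int) := by push_cast; ring
    rw [this, PySem.List.slice_natCast]
  have hslice3 : PySem.List.slice r (some ((en : Int) + 2)) none = r.drop (en + 2) := by
    rw [PySem.List.slice_from r (by positivity)]
    congr 1
  have hslice4 : PySem.List.slice r (some ((en : Int) + 1)) none = r.drop (en + 1) := by
    rw [PySem.List.slice_from r (by positivity)]
    congr 1
  by_cases hq : (en : Int) + 1 < (r.length : Int) ∧ PySem.List.pyGet? r ((en : Int) + 1) = some '?'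
  · have hqm : qmarkAt r en = true := (pvQmark_iff r en).mp hq
    simp only [hq, hslice1, hslice2, hslice3]
    unfold optsOf afterOf
    simp [hqm]
  · have hqm : qmarkAt r en = false :=
      Bool.eq_false_iff.mpr (fun h => hq ((pvQmark_iff r en).mpr h))
    simp only [hq, hslice1, hslice2, hslice4]
    unfold optsOf afterOf
    simp [hqm]

theorem parse_none (r : List Char) (hs : PySem.Chars.find r ['('] = -1) :
    parseParts r = [[r]] := by
  rw [parseParts]
  simp [hs]

theorem parse_group (r : List Char) (st en : Nat)
    (hs : PySem.Chars.find r ['('] = (st : Int))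
    (he : PySem.Chars.findFrom r [')'] ((st : Int) + 1) = (en : Int)) :
    parseParts r = [r.take st] :: optsOf r st en :: parseParts (afterOf r en) := by
  rw [parseParts]
  have hne : ¬ PySem.Chars.find r ['('] = -1 := by rw [hs]; omega
  have hne2 : ¬ PySem.Chars.findFrom r [')'] ((st : Int) + 1) = -1 := by rw [he]; omega
  simp only [hs, he]
  have hslice1 : PySem.List.slice r none (some (st : Int)) = r.take st := by
    rw [PySem.List.slice_to r (by positivity)]; simp
  have hslice2 : PySem.List.slice r (some ((st : Int) + 1)) (some (en : Int)) =
      (r.drop (st + 1)).take (en - (st + 1)) := by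
    have : ((st : Int) + 1) = ((st + 1 : Nat) : Int) := by push_cast; ring
    rw [this, PySem.List.slice_natCast]
  have hslice3 : PySem.List.slice r (some ((en : Int) + 2)) none = r.drop (en + 2) := by
    rw [PySem.List.slice_from r (by positivity)]
    congr 1
  have hslice4 : PySem.List.slice r (some ((en : Int) + 1)) none = r.drop (en + 1) := by
    rw [PySem.List.slice_from r (by positivity)]
    congr 1
  by_cases hq : (en : Int) + 1 < (r.length : Int) ∧ PySem.List.pyGet? r ((en : Int) + 1) = some '?'
  · have hqm : qmarkAt r en = true := (pvQmark_iff r en).mp hq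
    simp only [hq, hslice1, hslice2, hslice3]
    unfold optsOf afterOf
    simp [hqm]
  · have hqm : qmarkAt r en = false :=
      Bool.eq_false_iff.mpr (fun h => hq ((pvQmark_iff r en).mpr h))
    simp only [hq, hslice1, hslice2, hslice4]
    unfold optsOf afterOf
    simp [hqm]

theorem expandE_none (r : List Char) (hs : PySem.Chars.find r ['('] = -1) :
    expandE r = [r] := by
  rw [expandE, parse_none r hs]
  simp [prodParts]

theorem expandE_group (r : List Char) (st en : Nat)
    (hs : PySem.Chars.find r ['('] = (st : Int))
    (he : PySem.Chars.findFrom r [')'] ((st : Int) + 1) = (en : Int)) :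
    expandE r = (optsOf r st en).flatMap
      (fun o => (expandE (afterOf r en)).map (fun t => r.take st ++ (o ++ t))) := by
  rw [expandE, parse_group r st en hs he]
  simp only [prodParts, List.flatMap_singleton, List.map_flatMap, List.map_map]
  rfl

-- the precondition: every '(' in r is answered by a later ')'
theorem good_tail (c : Char) (cs : List Char) (hg : goodChars (c :: cs) = true) :
    goodChars cs = true := by
  simp only [goodChars, Bool.and_eq_true] at hg
  exact hg.2

theorem good_drop (r : List Char) (k : Nat) (hg : goodChars r = true) :
    goodChars (r.drop k) = true := by
  induction r generalizing k with
  | nil => simpa using hg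
  | cons c cs ih =>
    cases k with
    | zero => exact hg
    | succ k => exact ih k (good_tail c cs hg)

theorem good_mem_close (r : List Char) (i : Nat) (hg : goodChars r = true)
    (h : r[i]? = some '(') : ')' ∈ r.drop (i + 1) := by
  induction r generalizing i with
  | nil => simp at h
  | cons c cs ih =>
    cases i with
    | zero =>
      simp at h
      simp only [goodChars, Bool.and_eq_true, Bool.or_eq_true] at hg
      rcases hg.1 with h' | h'
      · simp [h] at h'
      · simpa using of_decide_eq_true h'
    | succ i =>
      simp only [List.getElem?_cons_succ] at h
      simpa using ih i (good_tail c cs hg) h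

theorem group_of_good (r : List Char) (hg : goodChars r = true)
    (hne : PySem.Chars.find r ['('] ≠ -1) :
    ∃ st en : Nat, PySem.Chars.find r ['('] = (st : Int) ∧
      PySem.Chars.findFrom r [')'] ((st : Int) + 1) = (en : Int) ∧
      st < en ∧ en < r.length := by
  obtain ⟨st, hstEq, hstGet, hstLt⟩ := pvFind_single r '(' hne
  have hmem : ')' ∈ r.drop (st + 1) := good_mem_close r st hg hstGet
  have hne2 : PySem.Chars.findFrom r [')'] ((st : Int) + 1) ≠ -1 := by
    have hcast : ((st : Int) + 1) = ((st + 1 : Nat) : Int) := by push_cast; ring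
    rw [hcast, PySem.Chars.findFrom_natCast r [')'] (st + 1) hstLt]
    have : PySem.Chars.find (r.drop (st + 1)) [')'] ≠ -1 := by
      rw [PySem.Chars.find_ne_neg_one_iff]
      exact (List.singleton_infix_iff ')' _).mpr hmem
    simp only [this, if_false]
    have h0 : 0 ≤ PySem.Chars.find (r.drop (st + 1)) [')'] := by
      rw [PySem.Chars.find_nonneg_iff]
      exact (List.singleton_infix_iff ')' _).mpr hmem
    omega
  obtain ⟨e, heEq, heGet, heLt⟩ := pvFindFrom_single r st hstLt hne2
  exact ⟨st, st + 1 + e, hstEq, heEq, by omega, heLt⟩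

-- the BFS invariant: a level of items sharing regex r, followed by already-expanded
-- items at the next level, yields the next-level expansions then this level's.
theorem aLoop_level_group (r : List Char) (st en : Nat)
    (hs : PySem.Chars.find r ['('] = (st : Int))
    (he : PySem.Chars.findFrom r [')'] ((st : Int) + 1) = (en : Int))
    (IH : ∀ (done2 : List (List Char)) (ts : List (List Char)),
      aLoop done2 (ts.map (fun t => (t, afterOf r en))) =
        done2 ++ ts.flatMap (fun t => (expandE (afterOf r en)).map (fun u => t ++ u))) :
    ∀ (ss ts done : List (List Char)),
      aLoop done (ss.map (fun s => (s, r)) ++ ts.map (fun t => (t, afterOf r en))) =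
        done ++ ts.flatMap (fun t => (expandE (afterOf r en)).map (fun u => t ++ u))
             ++ ss.flatMap (fun s => (expandE r).map (fun t => s ++ t)) := by
  intro ss
  induction ss with
  | nil =>
    intro ts done
    simp only [List.map_nil, List.nil_append, List.flatMap_nil, List.append_nil]
    exact IH done ts
  | cons s ss ihss =>
    intro ts done
    simp only [List.map_cons, List.cons_append]
    rw [aLoop_cons_group done s r _ st en hs he]
    have hqueue : (ss.map (fun s => (s, r)) ++ ts.map (fun t => (t, afterOf r en))) ++
        (optsOf r st en).map (fun o => (s ++ r.take st ++ o, afterOf r en)) =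
        ss.map (fun s => (s, r)) ++
          (ts ++ (optsOf r st en).map (fun o => s ++ r.take st ++ o)).map
            (fun t => (t, afterOf r en)) := by
      rw [List.append_assoc, List.map_append, List.map_map]
      rfl
    rw [hqueue, ihss]
    rw [List.flatMap_append, List.flatMap_cons]
    have hexp : ((optsOf r st en).map (fun o => s ++ r.take st ++ o)).flatMap
        (fun t => (expandE (afterOf r en)).map (fun u => t ++ u)) =
        (expandE r).map (fun t => s ++ t) := by
      rw [expandE_group r st en hs he]
      rw [List.flatMap_map, List.map_flatMap]
      simp only [List.map_map, Function.comp_def, List.append_assoc]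
    rw [hexp]
    simp [List.append_assoc]




-- levels: a queue of items all sharing regex r yields their expansions in order
theorem aLoop_level : ∀ (n : Nat) (r : List Char), r.length ≤ n → goodChars r = true →
    ∀ (done ss : List (List Char)),
      aLoop done (ss.map (fun s => (s, r))) =
        done ++ ss.flatMap (fun s => (expandE r).map (fun t => s ++ t)) := by
  intro n
  induction n with
  | zero =>
    intro r hlen hg done ss
    have hr : r = [] := List.length_eq_zero_iff.mp (by omega)
    subst hr
    have hfind : PySem.Chars.find ([] : List Char) ['('] = -1 := by decide
    induction ss generalizing done with
    | nil => simp [aLoop_nil]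
    | cons s ss ih =>
      rw [List.map_cons, aLoop_cons_none _ _ _ _ hfind, ih]
      rw [expandE_none _ hfind]
      simp
  | succ n ihn =>
    intro r hlen hg done ss
    by_cases hne : PySem.Chars.find r ['('] = -1
    · induction ss generalizing done with
      | nil => simp [aLoop_nil]
      | cons s ss ih =>
        rw [List.map_cons, aLoop_cons_none _ _ _ _ hne, ih]
        rw [expandE_none _ hne]
        simp
    · obtain ⟨st, en, hs, he, hlt, hen⟩ := group_of_good r hg hne
      have hafterlen : (afterOf r en).length ≤ n := by
        unfold afterOf
        split <;> simp only [List.length_drop] <;> omega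
      have hgood2 : goodChars (afterOf r en) = true := by
        unfold afterOf
        exact good_drop r _ hg
      have IH := fun done2 ts => ihn (afterOf r en) hafterlen hgood2 done2 ts
      have := aLoop_level_group r st en hs he IH ss [] done
      simpa using this

-- ===== VERDICT (by name: the statement is the Claim_ definition above) =====
theorem enumerate_regex_spec : Claim_equal_enumerate_regex := by
  intro regex _ hpre
  unfold Spec_enumerate_regex enumerate_regex enumerate_regex_alt
  have := aLoop_level regex.toList.length regex.toList le_rfl hpre [] [[]]
  simp only [List.map_cons, List.map_nil] at this
  rw [this]
  simp [expandE]
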